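-- pv_equiv track=rewrite | github.com/hhsieh00/macadamia | macadamia_functions_orig.py | add_apostrophe_escape
-- ===== SOURCE A (Python) =====
-- def add_apostrophe_escape(ast_name):
--     # add escape sequence for apostrophes for use in SQL insertion command
--     # param ast_name: original asteroid name with unescaped apostrophe(s)
--     # return: ast_name_new: modified asteroid name with escaped apostrophe(s)
--     num_apostrophes = 0
--     name_length = len(ast_name)
--     for idx in range(0,name_length):
--         if ast_name[idx] == "'":
--             num_apostrophes += 1
--     ast_name_temp = [0 for idx in range(name_length+num_apostrophes)] # initialize new name string
--     idx_new = 0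
--     for idx in range(0,name_length):
--         if ast_name[idx] != "'":
--             ast_name_temp[idx_new] = ast_name[idx]
--         else:
--             ast_name_temp[idx_new]   = "'"
--             ast_name_temp[idx_new+1] = "'"
--             idx_new += 1
--         idx_new += 1
--     ast_name_new = ''.join(ast_name_temp)
--     return ast_name_new
-- ===== SOURCE B (Python) =====
-- def add_apostrophe_escape(ast_name):
--     # split on apostrophes and rejoin with doubled apostrophes
--     return "''".join(ast_name.split("'"))
-- ===== Notes on version B (the rewrite author's own statement) =====
-- stated objective: idiomatic
-- what changed: Replaces the count-then-preallocate-then-index-fill two-pass loop with a one-line split-on-apostrophe / rejoin-with-doubled-apostrophe strategy.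
import Mathlib
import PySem

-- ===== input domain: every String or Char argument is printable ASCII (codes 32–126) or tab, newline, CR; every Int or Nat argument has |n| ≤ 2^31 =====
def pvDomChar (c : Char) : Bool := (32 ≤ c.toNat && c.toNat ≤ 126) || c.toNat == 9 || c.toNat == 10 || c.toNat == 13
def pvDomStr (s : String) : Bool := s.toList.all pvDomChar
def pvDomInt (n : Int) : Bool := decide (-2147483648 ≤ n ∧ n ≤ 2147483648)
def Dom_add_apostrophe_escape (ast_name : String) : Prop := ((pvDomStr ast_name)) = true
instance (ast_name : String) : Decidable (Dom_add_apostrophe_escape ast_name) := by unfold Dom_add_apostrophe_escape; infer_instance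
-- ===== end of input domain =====

-- B replaces A's count/preallocate/index-fill two-pass loop with a split-on-apostrophe + rejoin with "''" one-liner (idiomatic; same O(n), measurably faster constant via C-level split/join).


-- ===== PORT A =====
-- Literal port of A over the code points. Python preallocates the temp list with the int 0 in
-- every cell and overwrites every cell before joining; we preallocate with the char '0' (also
-- overwritten everywhere, so the fill value is never observable).
def add_apostrophe_escape (ast_name : String) : String :=
  let cs := ast_name.toList
  let name_length := PySem.List.len cs
  let num_apostrophes : Nat :=
    (PySem.List.pyRange 0 name_length).foldl
      (fun n idx => if PySem.List.pyGetD cs idx ' ' == '\'' then n + 1 else n) 0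
  let ast_name_temp := List.replicate (cs.length + num_apostrophes) '0'
  let st :=
    (PySem.List.pyRange 0 name_length).foldl
      (fun (st : List Char × Nat) idx =>
        let c := PySem.List.pyGetD cs idx ' '
        if c != '\'' then (st.1.set st.2 c, st.2 + 1)
        else ((st.1.set st.2 '\'').set (st.2 + 1) '\'', st.2 + 2))
      (ast_name_temp, 0)
  String.ofList st.1

-- ===== PORT B =====
-- Literal port of Source B: "''".join(ast_name.split("'")); the separator "'" is a nonempty literal,
-- so Python's split is exactly PySem.Chars.splitOn.
def add_apostrophe_escape_alt (ast_name : String) : String :=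
  String.ofList (PySem.Chars.join ['\'', '\''] (PySem.Chars.splitOn ast_name.toList ['\'']))

-- ===== PRECONDITION & SPEC =====
def Spec_add_apostrophe_escape (ast_name : String) (out : String) : Prop := out = add_apostrophe_escape_alt ast_name
instance (ast_name : String) (out : String) : Decidable (Spec_add_apostrophe_escape ast_name out) := by unfold Spec_add_apostrophe_escape; infer_instance

-- ===== CLAIM (what is proved, stated in full; the proofs are below) =====
def Claim_equal_add_apostrophe_escape : Prop := ∀ (ast_name : String), Dom_add_apostrophe_escape ast_name → Spec_add_apostrophe_escape ast_name (add_apostrophe_escape ast_name)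

-- ===== LEMMAS AND PROOFS =====

-- the intended result: every apostrophe doubled
def pvEsc (cs : List Char) : List Char :=
  cs.flatMap (fun c => if c == '\'' then ['\'', '\''] else [c])

-- prepend a prefix onto the first fragment
def pvGlue (pre : List Char) : List (List Char) → List (List Char)
  | [] => [pre]
  | a :: t => (pre ++ a) :: t

-- split on a single apostrophe, directly by structural recursion
def pvSplit1 : List Char → List (List Char)
  | [] => [[]]
  | c :: rest => if c = '\'' then [] :: pvSplit1 rest else pvGlue [c] (pvSplit1 rest)

theorem pvSplit1_ne_nil (l : List Char) : pvSplit1 l ≠ [] := by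
  cases l with
  | nil => simp [pvSplit1]
  | cons c rest =>
    simp only [pvSplit1]
    split
    · simp
    · cases h : pvSplit1 rest <;> simp [pvGlue]

theorem pvSplitOn_go_spec : ∀ (l : List Char) (fuel : Nat) (cur : List Char) (acc : List (List Char)),
    l.length ≤ fuel →
    PySem.Chars.splitOn.go ['\''] fuel l cur acc = acc.reverse ++ pvGlue cur.reverse (pvSplit1 l) := by
  intro l
  induction l with
  | nil =>
    intro fuel cur acc _
    cases fuel <;> simp [PySem.Chars.splitOn.go, pvSplit1, pvGlue]
  | cons c rest ih =>
    intro fuel cur acc hfuel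
    cases fuel with
    | zero => simp at hfuel
    | succ f =>
      by_cases hc : c = '\''
      · subst hc
        have hpre : (['\''] : List Char).isPrefixOf ('\'' :: rest) = true := by
          simp [List.isPrefixOf]
        rw [PySem.Chars.splitOn.go, if_pos hpre]
        simp only [List.length_cons] at hfuel
        simp only [show (['\''] : List Char).length = 1 from rfl, List.drop_succ_cons, List.drop_zero]
        rw [ih f [] (cur.reverse :: acc) (by omega)]
        simp [pvSplit1, pvGlue]
        cases h : pvSplit1 rest with
        | nil => exact absurd h (pvSplit1_ne_nil rest)
        | cons a t => simp [pvGlue]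
      · have hpre : (['\''] : List Char).isPrefixOf (c :: rest) = false := by
          simp [List.isPrefixOf]
          intro h; exact absurd h.symm hc
        rw [PySem.Chars.splitOn.go, if_neg (by simp [hpre])]
        simp only [List.length_cons] at hfuel
        rw [ih f (c :: cur) acc (by omega)]
        simp only [pvSplit1, if_neg hc]
        cases h : pvSplit1 rest with
        | nil => exact absurd h (pvSplit1_ne_nil rest)
        | cons a t => simp [pvGlue, List.reverse_cons]

theorem pvSplitOn_eq (cs : List Char) : PySem.Chars.splitOn cs ['\''] = pvSplit1 cs := by
  unfold PySem.Chars.splitOn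
  rw [pvSplitOn_go_spec cs (cs.length + 1) [] [] (by omega)]
  cases h : pvSplit1 cs with
  | nil => exact absurd h (pvSplit1_ne_nil cs)
  | cons a t => simp [pvGlue]

theorem pvJoin_split1 (cs : List Char) :
    PySem.Chars.join ['\'', '\''] (pvSplit1 cs) = pvEsc cs := by
  induction cs with
  | nil => simp [pvSplit1, PySem.Chars.join_singleton, pvEsc]
  | cons c rest ih =>
    simp only [pvSplit1]
    cases h : pvSplit1 rest with
    | nil => exact absurd h (pvSplit1_ne_nil rest)
    | cons a t =>
      rw [h] at ih
      by_cases hc : c = '\''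
      · subst hc
        rw [if_pos rfl, PySem.Chars.join_cons_cons, ih]
        simp [pvEsc]
      · rw [if_neg hc]
        have hb : (c == '\'') = false := by simp [hc]
        cases t with
        | nil =>
          simp only [pvGlue, PySem.Chars.join_singleton] at ih ⊢
          simp [pvEsc, hc, ih]
        | cons b t' =>
          simp only [pvGlue, PySem.Chars.join_cons_cons] at ih ⊢
          rw [show pvEsc (c :: rest) = [c] ++ pvEsc rest from by simp [pvEsc, hc], ← ih]
          simp

-- A's counting loop counts apostrophes
theorem pvCount_fold (cs : List Char) : ∀ (k : Nat),
    cs.foldl (fun n c => if c == '\'' then n + 1 else n) k = k + cs.count '\'' := by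
  induction cs with
  | nil => intro k; simp
  | cons c rest ih =>
    intro k
    simp only [List.foldl_cons]
    by_cases hc : c = '\''
    · subst hc
      simp only [beq_self_eq_true, if_true, ih, List.count_cons, beq_self_eq_true]
      omega
    · have hb : (c == '\'') = false := by simp [hc]
      simp only [hb, Bool.false_eq_true, if_false, ih, List.count_cons]
      omega

-- A's fill loop writes pvEsc into the preallocated tail
theorem pvFill_fold : ∀ (rest done pad : List Char),
    pad.length = rest.length + rest.count '\'' →
    (rest.foldl
      (fun (st : List Char × Nat) c =>
        if c != '\'' then (st.1.set st.2 c, st.2 + 1)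
        else ((st.1.set st.2 '\'').set (st.2 + 1) '\'', st.2 + 2))
      (done ++ pad, done.length)).1 = done ++ pvEsc rest := by
  intro rest
  induction rest with
  | nil =>
    intro done pad hlen
    simp at hlen
    subst hlen
    simp [pvEsc]
  | cons c rest ih =>
    intro done pad hlen
    by_cases hc : c = '\''
    · subst hc
      simp only [List.count_cons, List.length_cons, beq_self_eq_true, if_pos] at hlen
      cases pad with
      | nil => simp at hlen
      | cons p1 pt =>
      cases pt with
      | nil => simp at hlen; omega
      | cons p2 ps =>
        simp only [List.foldl_cons, bne_self_eq_false, Bool.false_eq_true, reduceIte]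
        have h1 : (done ++ p1 :: p2 :: ps).set done.length '\'' = done ++ '\'' :: p2 :: ps := by
          rw [List.set_append]
          simp
        have h2 : (done ++ '\'' :: p2 :: ps).set (done.length + 1) '\'' = done ++ '\'' :: '\'' :: ps := by
          rw [List.set_append]
          simp
        rw [h1, h2]
        have := ih (done ++ ['\'', '\'']) ps (by simp at hlen ⊢; omega)
        simp only [List.append_assoc, List.length_append, List.length_cons, List.length_nil] at this
        simp only [pvEsc, List.flatMap_cons, beq_self_eq_true, if_pos]
        rw [show done.length + 2 = done.length + (0 + 1 + 1) from by omega] at this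
        simpa [pvEsc] using this
    · have hb : (c == '\'') = false := by simp [hc]
      simp only [List.count_cons, hb, List.length_cons] at hlen
      cases pad with
      | nil => simp at hlen; omega
      | cons p1 ps =>
        simp only [List.foldl_cons, bne, hb, Bool.not_false, if_true]
        have h1 : (done ++ p1 :: ps).set done.length c = done ++ c :: ps := by
          rw [List.set_append]
          simp
        rw [h1]
        have := ih (done ++ [c]) ps (by simp at hlen ⊢; omega)
        simp only [List.append_assoc, List.length_append, List.length_cons, List.length_nil] at this
        simp only [pvEsc, List.flatMap_cons, hb, Bool.false_eq_true, reduceIte]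
        rw [show done.length + 1 = done.length + (0 + 1) from by omega] at this
        simpa [pvEsc] using this

-- ===== VERDICT (by name: the statement is the Claim_ definition above) =====
theorem add_apostrophe_escape_spec : Claim_equal_add_apostrophe_escape := by
  intro s _
  unfold Spec_add_apostrophe_escape add_apostrophe_escape add_apostrophe_escape_alt
  simp only []
  set cs := s.toList with hcs
  -- reduce the two index loops to folds over cs
  rw [PySem.List.foldl_pyRange_pyGetD cs ' ' (fun n c => if c == '\'' then n + 1 else n) 0 (le_refl 0)]
  rw [PySem.List.foldl_pyRange_pyGetD cs ' '
        (fun (st : List Char × Nat) c =>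
          if c != '\'' then (st.1.set st.2 c, st.2 + 1)
          else ((st.1.set st.2 '\'').set (st.2 + 1) '\'', st.2 + 2))
        _ (le_refl 0)]
  simp only [Int.toNat_zero, List.drop_zero]
  rw [pvCount_fold cs 0]
  have hfill := pvFill_fold cs [] (List.replicate (cs.length + (0 + cs.count '\'')) '0')
      (by simp)
  simp only [List.nil_append, List.length_nil] at hfill
  rw [hfill, pvSplitOn_eq, pvJoin_split1]
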